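-- pv_equiv track=rewrite | github.com/HuyaneMatsu/hata | hata/ext/commands/command.py | generate_alters_for
-- ===== SOURCE A (Python) =====
-- AUTO_DASH_APPLICABLES = ('-', '_')
--
-- def generate_alters_for(name):
--     """
--     Generates alternative command names from the given one.
--
--     Parameters
--     ----------
--     name : `str`
--         A command's or an aliase's name.
--
--     Returns
--     -------
--     alters : `list` of `str`
--     """
--     chars = []
--     pattern = []
--     for char in name:
--         if char in AUTO_DASH_APPLICABLES:
--             if chars:
--                 pattern.append(''.join(chars))
--                 chars.clear()
--
--             pattern.append(None)
--             continue
--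
--         chars.append(char)
--         continue
--
--     if chars:
--         pattern.append(''.join(chars))
--         chars.clear()
--
--     alters = []
--     if len(pattern) == 1:
--         alters.append(pattern[0])
--
--     else:
--         generated = [[]]
--         for part in pattern:
--             if (part is not None):
--                 for generated_sub in generated:
--                     generated_sub.append(part)
--                 continue
--
--             count = len(generated)
--             for _ in range(len(AUTO_DASH_APPLICABLES)-1):
--                 for index in range(count):
--                     generated_sub = generated[index]
--                     generated_sub = generated_sub.copy()
--                     generated.append(generated_sub)
--
--             index = 0
--             for char in AUTO_DASH_APPLICABLES:
--                 for _ in range(count):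
--                     generated_sub = generated[index]
--                     generated_sub.append(char)
--
--                     index += 1
--
--         connected = [''.join(generated_sub) for generated_sub in generated]
--         alters.extend(connected)
--
--     return alters
-- ===== SOURCE B (Python) =====
-- AUTO_DASH_APPLICABLES = ('-', '_')
--
-- def generate_alters_for(name):
--     # Split the name into literal runs around separators, then enumerate every
--     # way to refill the separator slots (first slot varies fastest).
--     pieces = []
--     run = ''
--     for char in name:
--         if char in AUTO_DASH_APPLICABLES:
--             pieces.append(run)
--             run = ''
--         else:
--             run += char
--     pieces.append(run)
--     combos = [[]]
--     for _ in range(len(pieces) - 1):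
--         combos = [combo + [char] for char in AUTO_DASH_APPLICABLES for combo in combos]
--     alters = []
--     for combo in combos:
--         out = pieces[0]
--         for sep, piece in zip(combo, pieces[1:]):
--             out += sep + piece
--         alters.append(out)
--     return alters
-- ===== Notes on version B (the rewrite author's own statement) =====
-- stated objective: alternative
-- what changed: B splits the name once into literal runs, enumerates the separator combinations as an explicit Cartesian product (first slot varying fastest), and joins each combination with the runs, instead of A's in-place doubling of a list of partial token lists with index-arithmetic copy/assign loops at every separator.
-- outside the precondition, e.g. on generate_alters_for('-'): A returns [None], B returns ['-', '_']; on generate_alters_for('_'): A returns [None], B returns ['-', '_']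
import Mathlib
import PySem

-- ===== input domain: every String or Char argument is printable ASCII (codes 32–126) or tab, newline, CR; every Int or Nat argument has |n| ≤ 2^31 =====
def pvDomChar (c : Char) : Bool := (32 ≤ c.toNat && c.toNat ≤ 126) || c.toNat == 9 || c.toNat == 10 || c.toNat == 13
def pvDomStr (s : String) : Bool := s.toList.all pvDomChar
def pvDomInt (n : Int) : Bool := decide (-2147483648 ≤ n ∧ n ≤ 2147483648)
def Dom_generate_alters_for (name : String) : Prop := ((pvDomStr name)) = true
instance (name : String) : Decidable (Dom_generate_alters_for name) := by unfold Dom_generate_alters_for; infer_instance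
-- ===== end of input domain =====

-- B re-implements the same alternative-name generation by enumerating the separator
-- combinations explicitly over split literal runs (objective: alternative decomposition,
-- same asymptotic cost); equivalence is proved for every name except the two lone
-- separators "-" and "_", on which A returns [None] (not a list of strings).
-- Python strings are represented as their List Char throughout and converted at the end.

-- ===== PORT A =====
-- AUTO_DASH_APPLICABLES = ('-', '_')  (one-char strings, as char lists)
def pvADA : List (List Char) := [['-'], ['_']]

-- the parse loop of A: state (chars, pattern)
def pvAParseStep (st : List Char × List (Option (List Char))) (c : Char) :
    List Char × List (Option (List Char)) :=
  if [c] ∈ pvADA then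
    ([], (if st.1 = [] then st.2 else st.2 ++ [some st.1]) ++ [none])
  else
    (st.1 ++ [c], st.2)

-- for index in range(count): generated.append(generated[index].copy())
def pvACopyLoop (g : List (List (List Char))) (count : Nat) : List (List (List Char)) :=
  (PySem.List.pyRange 0 (count : Int) 1).foldl
    (fun h idx => h ++ [PySem.List.pyGetD h idx []]) g

-- generated[index].append(char); index += 1
def pvAAssignStep (ch : List Char) (st : List (List (List Char)) × Int) (_i : Int) :
    List (List (List Char)) × Int :=
  (PySem.List.pySetD st.1 st.2 (PySem.List.pyGetD st.1 st.2 [] ++ [ch]), st.2 + 1)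

-- the body A runs for a None entry of pattern
def pvASepExpand (g : List (List (List Char))) : List (List (List Char)) :=
  let count := g.length
  -- for _ in range(len(AUTO_DASH_APPLICABLES) - 1): <copy loop>
  let g1 := (PySem.List.pyRange 0 ((pvADA.length : Int) - 1) 1).foldl
    (fun h _ => pvACopyLoop h count) g
  -- index = 0; for char in AUTO_DASH_APPLICABLES: for _ in range(count): <assign>
  (pvADA.foldl (fun st ch => (PySem.List.pyRange 0 (count : Int) 1).foldl (pvAAssignStep ch) st)
    (g1, 0)).1

-- one iteration of 'for part in pattern'
def pvAPartStep (g : List (List (List Char))) (part : Option (List Char)) :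
    List (List (List Char)) :=
  match part with
  | some s => g.map (fun sub => sub ++ [s])
  | none => pvASepExpand g

def generate_alters_for (name : String) : List String :=
  let st := name.toList.foldl pvAParseStep ([], [])
  let pattern := if st.1 = [] then st.2 else st.2 ++ [some st.1]
  if pattern.length = 1 then
    -- Python appends pattern[0] itself; it is None exactly for a lone separator,
    -- which Pre_ excludes (A's result [None] is not a list of strings there)
    [String.ofList ((pattern.headD none).getD [])]
  else
    (pattern.foldl pvAPartStep [[]]).map (fun sub => String.ofList sub.flatten)  -- ''.join

-- ===== PORT B =====
-- parse loop of B: state (pieces-so-far, current run)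
def pvBParseStep (st : List (List Char) × List Char) (c : Char) :
    List (List Char) × List Char :=
  if [c] ∈ pvADA then (st.1 ++ [st.2], []) else (st.1, st.2 ++ [c])

def generate_alters_for_alt (name : String) : List String :=
  let st := name.toList.foldl pvBParseStep ([], [])
  let pieces := st.1 ++ [st.2]
  -- combos = [[]]; for _ in range(len(pieces) - 1): combos = [c + [ch] for ch in ADA for c in combos]
  let combos := (PySem.List.pyRange 0 ((pieces.length : Int) - 1) 1).foldl
    (fun cs _ => pvADA.flatMap (fun ch => cs.map (fun combo => combo ++ [ch]))) [[]]
  combos.map (fun combo =>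
    String.ofList ((combo.zip pieces.tail).foldl (fun out sp => out ++ sp.1 ++ sp.2)
      (pieces.headD [])))

-- ===== PRECONDITION & SPEC =====
-- Pre_ excludes exactly the two one-character names "-" and "_": there A returns
-- [None] (not a value of type list[str]); B returns the two natural variants.
def Pre_generate_alters_for (name : String) : Prop := name ≠ "-" ∧ name ≠ "_"
instance (name : String) : Decidable (Pre_generate_alters_for name) := by
  unfold Pre_generate_alters_for; infer_instance

def pvWitness_generate_alters_for : String := "ban-hammer_now"

def Spec_generate_alters_for (name : String) (out : List String) : Prop :=
  out = generate_alters_for_alt name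
instance (name : String) (out : List String) : Decidable (Spec_generate_alters_for name out) := by
  unfold Spec_generate_alters_for; infer_instance

-- ===== CLAIM (what is proved, stated in full; the proofs are below) =====
def Claim_equal_generate_alters_for : Prop :=
  ∀ (name : String), Dom_generate_alters_for name → Pre_generate_alters_for name →
    Spec_generate_alters_for name (generate_alters_for name)

-- ===== LEMMAS AND PROOFS =====

-- the pattern fragment a finished literal run contributes
def pvOpt (p : List Char) : List (Option (List Char)) := if p = [] then [] else [some p]

def pvFlat (ps : List (List Char)) : List (Option (List Char)) :=
  ps.flatMap (fun p => pvOpt p ++ [none])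

-- recursive splitter: (literal runs before each separator, trailing run)
def pvF : List Char → List Char → List (List Char) × List Char
  | [], run => ([], run)
  | c :: r, run =>
    if [c] ∈ pvADA then
      let t := pvF r []
      (run :: t.1, t.2)
    else pvF r (run ++ [c])

-- the separator combinations, first slot varying fastest
def pvCombos : Nat → List (List (List Char))
  | 0 => [[]]
  | n + 1 => (pvCombos n).flatMap (fun c => [['-'] :: c, ['_'] :: c])

-- fill the None slots of a pattern with the given separators
def pvFill : List (Option (List Char)) → List (List Char) → List (List Char)
  | [], _ => []
  | some s :: r, cs => s :: pvFill r cs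
  | none :: _, [] => []
  | none :: r, c :: cs => c :: pvFill r cs
theorem pvB_parse_eq_pvF' (cs : List Char) : ∀ (ps0 : List (List Char)) (run0 : List Char),
    cs.foldl pvBParseStep (ps0, run0) = (ps0 ++ (pvF cs run0).1, (pvF cs run0).2) := by
  induction cs with
  | nil => intro ps0 run0; simp [pvF]
  | cons c r ih =>
    intro ps0 run0
    by_cases h : [c] ∈ pvADA
    · simp [List.foldl_cons, pvBParseStep, h, pvF, ih]
    · simp [List.foldl_cons, pvBParseStep, h, pvF, ih]

theorem pvA_parse_rel' (cs : List Char) : ∀ (ps0 : List (List Char)) (run0 : List Char)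
    (pat0 : List (Option (List Char))),
    cs.foldl pvAParseStep (run0, pat0 ++ pvFlat ps0) =
      ((cs.foldl pvBParseStep (ps0, run0)).2, pat0 ++ pvFlat (cs.foldl pvBParseStep (ps0, run0)).1) := by
  induction cs with
  | nil => intro ps0 run0 pat0; simp
  | cons c r ih =>
    intro ps0 run0 pat0
    by_cases h : [c] ∈ pvADA
    · have hopt : (if run0 = [] then pat0 ++ pvFlat ps0
          else (pat0 ++ pvFlat ps0) ++ [some run0]) ++ [none] =
          pat0 ++ pvFlat (ps0 ++ [run0]) := by
        by_cases hr : run0 = [] <;> simp [hr, pvOpt, pvFlat]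
      simp only [List.foldl_cons, pvAParseStep, pvBParseStep, h, if_true, List.append_assoc] at hopt ⊢
      rw [hopt, ih (ps0 ++ [run0]) []]
    · simp only [List.foldl_cons, pvAParseStep, pvBParseStep, h, if_false]
      exact ih ps0 (run0 ++ [c]) pat0


theorem pvCombos_snoc' (n : Nat) :
    pvCombos (n + 1) = [['-'], ['_']].flatMap (fun ch => (pvCombos n).map (fun c => c ++ [ch])) := by
  induction n with
  | zero => simp [pvCombos]
  | succ n ih =>
    show (pvCombos (n+1)).flatMap _ = [['-'], ['_']].flatMap (fun ch => (pvCombos (n+1)).map (fun c => c ++ [ch]))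
    conv_lhs => rw [ih]
    conv_rhs => rw [show pvCombos (n+1) = (pvCombos n).flatMap (fun c => [['-'] :: c, ['_'] :: c]) from rfl]
    simp [List.map_flatMap, List.flatMap_map]

theorem pvB_combos_eq' (n : Nat) :
    (PySem.List.pyRange 0 (n : Int) 1).foldl
      (fun cs _ => pvADA.flatMap (fun ch => cs.map (fun combo => combo ++ [ch]))) [[]] =
    pvCombos n := by
  induction n with
  | zero => simp [PySem.List.pyRange_one_eq_nil, pvCombos]
  | succ n ih =>
    have h1 : ((n+1 : Nat) : Int) = (n : Int) + 1 := by push_cast; ring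
    rw [h1, PySem.List.pyRange_one_succ_right (by omega), List.foldl_append, ih,
      List.foldl_cons, List.foldl_nil, pvCombos_snoc']
    rfl

theorem pvA_loop_eq' (hsep : ∀ g, pvASepExpand g = g.map (fun s => s ++ [['-']]) ++ g.map (fun s => s ++ [['_']]))
    (pat : List (Option (List Char))) :
    ∀ (g : List (List (List Char))),
    pat.foldl pvAPartStep g =
      (pvCombos (pat.countP (·.isNone))).flatMap (fun c => g.map (fun s => s ++ pvFill pat c)) := by
  induction pat with
  | nil => intro g; simp [pvCombos, pvFill]
  | cons part rest ih =>
    intro g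
    match part with
    | some s =>
      rw [List.foldl_cons]
      show List.foldl _ (g.map fun sub => sub ++ [s]) rest = _
      rw [ih]
      simp only [List.countP_cons, Option.isNone_some, List.map_map]
      congr 1
      funext c
      simp [pvFill, Function.comp, List.append_assoc]
    | none =>
      rw [List.foldl_cons]
      show List.foldl _ (pvASepExpand g) rest = _
      rw [hsep, ih]
      have hc : ((none :: rest : List (Option (List Char))).countP (·.isNone)) = rest.countP (·.isNone) + 1 := by
        simp
      rw [hc]
      show _ = ((pvCombos _).flatMap fun c => [['-'] :: c, ['_'] :: c]).flatMap _
      rw [List.flatMap_assoc]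
      congr 1
      funext c
      simp [pvFill, Function.comp_def, List.append_assoc]

theorem pvACopyLoop_eq (n : Nat) : ∀ (g : List (List (List Char))), n ≤ g.length →
    pvACopyLoop g n = g ++ g.take n := by
  induction n with
  | zero => intro g _; simp [pvACopyLoop, PySem.List.pyRange_one_eq_nil]
  | succ n ih =>
    intro g hn
    have h1 : ((n+1 : Nat) : Int) = (n : Int) + 1 := by push_cast; ring
    have hlt : n < g.length := by omega
    unfold pvACopyLoop at ih ⊢
    rw [h1, PySem.List.pyRange_one_succ_right (by omega), List.foldl_append,
      ih g (by omega), List.foldl_cons, List.foldl_nil,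
      PySem.List.pyGetD_natCast]
    have hget : (g ++ g.take n).getD n [] = g[n] := by
      rw [List.getD, List.getElem?_append_left (by omega), List.getElem?_eq_getElem hlt]
      rfl
    rw [hget, List.take_add_one, List.getElem?_eq_getElem hlt]
    simp

def pvIterAssign (ch : List Char) : Nat → (List (List (List Char)) × Int) → (List (List (List Char)) × Int)
  | 0, st => st
  | n + 1, st => pvIterAssign ch n (pvAAssignStep ch st 0)

theorem pvAssign_foldl_eq (ch : List Char) (l : List Int) : ∀ st,
    l.foldl (pvAAssignStep ch) st = pvIterAssign ch l.length st := by
  induction l with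
  | nil => intro st; rfl
  | cons x r ih =>
    intro st
    rw [List.foldl_cons, ih]
    rfl

theorem pvIterAssign_eq (ch : List Char) (n : Nat) :
    ∀ (pre rest : List (List (List Char))), n ≤ rest.length →
    pvIterAssign ch n (pre ++ rest, (pre.length : Int)) =
      (pre ++ (rest.take n).map (fun s => s ++ [ch]) ++ rest.drop n,
       ((pre.length + n : Nat) : Int)) := by
  induction n with
  | zero => intro pre rest _; simp [pvIterAssign]
  | succ n ih =>
    intro pre rest hle
    match rest, hle with
    | r0 :: rest', hle =>
      have hstep : pvAAssignStep ch (pre ++ r0 :: rest', (pre.length : Int)) 0 =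
          (pre ++ (r0 ++ [ch]) :: rest', ((pre ++ [r0 ++ [ch]]).length : Int)) := by
        unfold pvAAssignStep
        rw [PySem.List.pySetD_natCast]
        simp [PySem.List.pyGetD]
      show pvIterAssign ch n (pvAAssignStep ch (pre ++ r0 :: rest', (pre.length : Int)) 0) = _
      rw [hstep]
      have : pre ++ (r0 ++ [ch]) :: rest' = (pre ++ [r0 ++ [ch]]) ++ rest' := by simp
      rw [this, ih (pre ++ [r0 ++ [ch]]) rest' (by simpa using Nat.lt_succ_iff.mp (Nat.lt_of_succ_le hle))]
      simp only [List.take_succ_cons, List.drop_succ_cons, List.map_cons, List.length_append,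
        List.length_cons, List.length_nil]
      rw [Prod.mk.injEq]
      constructor
      · simp
      · push_cast; ring

theorem pvASepExpand_eq' (g : List (List (List Char))) :
    pvASepExpand g = g.map (fun s => s ++ [['-']]) ++ g.map (fun s => s ++ [['_']]) := by
  have hrange : PySem.List.pyRange 0 ((pvADA.length : Int) - 1) 1 = [0] := by decide
  have hlen : (PySem.List.pyRange 0 (g.length : Int) 1).length = g.length := by
    simp [PySem.List.length_pyRange_one]
  show (pvADA.foldl
      (fun st ch => (PySem.List.pyRange 0 (g.length : Int) 1).foldl (pvAAssignStep ch) st)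
      ((PySem.List.pyRange 0 ((pvADA.length : Int) - 1) 1).foldl
        (fun h _ => pvACopyLoop h g.length) g, 0)).1 = _
  rw [hrange, List.foldl_cons, List.foldl_nil, pvACopyLoop_eq g.length g le_rfl, List.take_length]
  show ((PySem.List.pyRange 0 (g.length : Int) 1).foldl (pvAAssignStep ['_'])
      ((PySem.List.pyRange 0 (g.length : Int) 1).foldl (pvAAssignStep ['-']) (g ++ g, 0))).1 = _
  rw [pvAssign_foldl_eq, pvAssign_foldl_eq, hlen]
  have h0 : ((g ++ g : List (List (List Char))), (0 : Int)) =
      (([] : List (List (List Char))) ++ (g ++ g), ((([] : List (List (List Char))).length : Nat) : Int)) := by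
    simp
  rw [h0, pvIterAssign_eq ['-'] g.length [] (g ++ g) (by simp)]
  simp only [List.nil_append, List.take_left, List.drop_left, List.length_nil, Nat.zero_add]
  have h1 : ((g.length : Nat) : Int) = (((g.map (fun s => s ++ [['-']])).length : Nat) : Int) := by simp
  rw [h1, pvIterAssign_eq ['_'] g.length (g.map (fun s => s ++ [['-']])) g le_rfl]
  simp

-- flatten of combo/pieces interleaving, and a joined pieces list
def pvICat : List (List Char) → List (List Char) → List Char
  | _, [] => []
  | [], _ => []
  | t :: ts, c :: cs => c ++ t ++ pvICat ts cs

def pvJoin : List (List Char) → List (List Char) → List Char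
  | [], _ => []
  | q :: qs, cs => q ++ pvICat qs cs

theorem pvZipFold (ts : List (List Char)) : ∀ (cs : List (List Char)) (acc : List Char),
    (cs.zip ts).foldl (fun out sp => out ++ sp.1 ++ sp.2) acc = acc ++ pvICat ts cs := by
  induction ts with
  | nil => intro cs acc; cases cs <;> simp [pvICat]
  | cons t ts ih =>
    intro cs acc
    cases cs with
    | nil => simp [pvICat]
    | cons c cs' =>
      show (((c, t) :: cs'.zip ts).foldl (fun out sp => out ++ sp.1 ++ sp.2) acc) = _
      rw [List.foldl_cons, ih]
      simp [pvICat, List.append_assoc]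

theorem pvICat_cons (qs : List (List Char)) (h : qs ≠ []) (c : List Char) (cs : List (List Char)) :
    pvICat qs (c :: cs) = c ++ pvJoin qs cs := by
  match qs with
  | q :: qs' => simp [pvICat, pvJoin, List.append_assoc]

theorem pvFill_flatten (ps : List (List Char)) : ∀ (run : List Char) (combo : List (List Char)),
    combo.length = ps.length →
    (pvFill (pvFlat ps ++ pvOpt run) combo).flatten = pvJoin (ps ++ [run]) combo := by
  induction ps with
  | nil =>
    intro run combo hlen
    match combo, hlen with
    | [], _ =>
      by_cases hr : run = [] <;> simp [pvFlat, pvOpt, hr, pvFill, pvJoin, pvICat]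
  | cons p ps' ih =>
    intro run combo hlen
    match combo, hlen with
    | c :: cs', hlen =>
      have hlen' : cs'.length = ps'.length := by simpa using hlen
      have hne : ps' ++ [run] ≠ [] := by simp
      by_cases hp : p = []
      · subst hp
        have hL : pvFlat ([] :: ps') ++ pvOpt run = none :: (pvFlat ps' ++ pvOpt run) := by
          simp [pvFlat, pvOpt]
        rw [hL, show pvFill (none :: (pvFlat ps' ++ pvOpt run)) (c :: cs') =
            c :: pvFill (pvFlat ps' ++ pvOpt run) cs' from rfl,
          List.flatten_cons, ih run cs' hlen',
          show (([] : List Char) :: ps') ++ [run] = ([] : List Char) :: (ps' ++ [run]) from rfl,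
          show pvJoin (([] : List Char) :: (ps' ++ [run])) (c :: cs') =
            pvICat (ps' ++ [run]) (c :: cs') by simp [pvJoin],
          pvICat_cons _ hne]
      · have hL : pvFlat (p :: ps') ++ pvOpt run = some p :: none :: (pvFlat ps' ++ pvOpt run) := by
          simp [pvFlat, pvOpt, hp]
        rw [hL, show pvFill (some p :: none :: (pvFlat ps' ++ pvOpt run)) (c :: cs') =
            p :: c :: pvFill (pvFlat ps' ++ pvOpt run) cs' from rfl,
          List.flatten_cons, List.flatten_cons, ih run cs' hlen',
          show ((p :: ps') ++ [run] : List (List Char)) = p :: (ps' ++ [run]) from rfl,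
          show pvJoin (p :: (ps' ++ [run])) (c :: cs') = p ++ pvICat (ps' ++ [run]) (c :: cs') from rfl,
          pvICat_cons _ hne]

theorem pvCombos_mem_length (n : Nat) : ∀ c ∈ pvCombos n, c.length = n := by
  induction n with
  | zero => intro c hc; simp [pvCombos] at hc; simp [hc]
  | succ n ih =>
    intro c hc
    simp only [pvCombos, List.mem_flatMap, List.mem_cons, List.not_mem_nil, or_false] at hc
    obtain ⟨a, ha, h | h⟩ := hc <;> subst h <;> simp [ih a ha]


theorem pvCount (ps : List (List Char)) (run : List Char) :
    (pvFlat ps ++ pvOpt run).countP (·.isNone) = ps.length := by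
  induction ps with
  | nil => by_cases hr : run = [] <;> simp [pvFlat, pvOpt, hr]
  | cons p ps' ih =>
    have hthis : pvFlat (p :: ps') ++ pvOpt run = (pvOpt p ++ [none]) ++ (pvFlat ps' ++ pvOpt run) := by
      simp [pvFlat]
    rw [hthis, List.countP_append, ih]
    by_cases hp : p = [] <;> (simp [pvOpt, hp]; omega)

theorem pvF_no_sep (cs : List Char) : ∀ (run : List Char), (pvF cs run).1 = [] →
    pvF cs run = ([], run ++ cs) := by
  induction cs with
  | nil => intro run _; simp [pvF]
  | cons c r ih =>
    intro run h
    by_cases hc : [c] ∈ pvADA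
    · rw [show pvF (c :: r) run = (run :: (pvF r []).1, (pvF r []).2) by simp [pvF, hc]] at h ⊢
      simp at h
    · rw [show pvF (c :: r) run = pvF r (run ++ [c]) by simp [pvF, hc]] at h ⊢
      rw [ih _ h]
      simp

theorem pvF_prefix (cs : List Char) : ∀ (run a : List Char) (as_ : List (List Char)),
    (pvF cs run).1 = a :: as_ → run <+: a := by
  induction cs with
  | nil => intro run a as_ h; simp [pvF] at h
  | cons c r ih =>
    intro run a as_ h
    by_cases hc : [c] ∈ pvADA
    · rw [show pvF (c :: r) run = (run :: (pvF r []).1, (pvF r []).2) by simp [pvF, hc]] at h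
      have hra : run = a := (List.cons.inj h).1
      exact hra ▸ List.prefix_refl run
    · rw [show pvF (c :: r) run = pvF r (run ++ [c]) by simp [pvF, hc]] at h
      exact (List.prefix_append run [c]).trans (ih _ a as_ h)

theorem pvF_lone (cs : List Char) (h : pvF cs [] = ([[]], [])) :
    cs = ['-'] ∨ cs = ['_'] := by
  match cs with
  | [] => simp [pvF] at h
  | c :: r =>
    by_cases hc : [c] ∈ pvADA
    · rw [show pvF (c :: r) [] = (([] : List Char) :: (pvF r []).1, (pvF r []).2) by simp [pvF, hc]] at h
      have h1 : (pvF r []).1 = [] := by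
        have := (Prod.mk.injEq .. ▸ h).1
        simpa using (List.cons.inj this).2
      have h2 := (Prod.mk.injEq .. ▸ h).2
      have := pvF_no_sep r [] h1
      rw [this] at h2
      simp at h2
      subst h2
      simp [pvADA] at hc
      rcases hc with hc | hc <;> simp [hc]
    · rw [show pvF (c :: r) [] = pvF r [c] by simp [pvF, hc]] at h
      have := pvF_prefix r [c] [] [] (by rw [h])
      simp at this

theorem pvGen (ps : List (List Char)) (run : List Char) :
    ((pvFlat ps ++ pvOpt run).foldl pvAPartStep [[]]).map (fun sub => String.ofList sub.flatten) =
      (pvCombos ps.length).map (fun combo => String.ofList (pvJoin (ps ++ [run]) combo)) := by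
  rw [pvA_loop_eq' pvASepExpand_eq', pvCount]
  have h1 : ∀ c : List (List Char),
      ([[]] : List (List (List Char))).map (fun s => s ++ pvFill (pvFlat ps ++ pvOpt run) c) =
        [pvFill (pvFlat ps ++ pvOpt run) c] := by intro c; simp
  simp only [h1]
  rw [show (pvCombos ps.length).flatMap (fun c => [pvFill (pvFlat ps ++ pvOpt run) c]) =
      (pvCombos ps.length).map (fun c => pvFill (pvFlat ps ++ pvOpt run) c) from
    (List.map_eq_flatMap ..).symm]
  rw [List.map_map]
  apply List.map_congr_left
  intro c hc
  simp [Function.comp, pvFill_flatten ps run c (pvCombos_mem_length _ c hc)]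

theorem pvMain (name : String) (hpre : name ≠ "-" ∧ name ≠ "_") :
    generate_alters_for name = generate_alters_for_alt name := by
  obtain ⟨ps, run, hF⟩ : ∃ ps run, pvF name.toList [] = (ps, run) := ⟨_, _, rfl⟩
  have hst : name.toList.foldl pvAParseStep ([], []) = (run, pvFlat ps) := by
    have h := pvA_parse_rel' name.toList [] [] []
    rw [pvB_parse_eq_pvF' name.toList [] [], hF] at h
    have h0 : pvFlat ([] : List (List Char)) = [] := rfl
    rw [h0] at h
    simpa using h
  have hA : generate_alters_for name =
      (if (pvFlat ps ++ pvOpt run).length = 1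
       then [String.ofList (((pvFlat ps ++ pvOpt run).headD none).getD [])]
       else ((pvFlat ps ++ pvOpt run).foldl pvAPartStep [[]]).map
         (fun sub => String.ofList sub.flatten)) := by
    unfold generate_alters_for
    rw [hst]
    have hpat : (if run = [] then pvFlat ps else pvFlat ps ++ [some run]) =
        pvFlat ps ++ pvOpt run := by
      by_cases hr : run = [] <;> simp [pvOpt, hr]
    show (if (if run = [] then pvFlat ps else pvFlat ps ++ [some run]).length = 1
        then [String.ofList (((if run = [] then pvFlat ps else pvFlat ps ++ [some run]).headD
          none).getD [])]
        else ((if run = [] then pvFlat ps else pvFlat ps ++ [some run]).foldl pvAPartStep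
          [[]]).map (fun sub => String.ofList sub.flatten)) = _
    rw [hpat]
  obtain ⟨q, qs, hq⟩ : ∃ q qs, ps ++ [run] = q :: qs := by
    cases ps with
    | nil => exact ⟨run, [], rfl⟩
    | cons p ps' => exact ⟨p, ps' ++ [run], rfl⟩
  have hBv : generate_alters_for_alt name =
      (pvCombos ps.length).map (fun combo => String.ofList (pvJoin (ps ++ [run]) combo)) := by
    unfold generate_alters_for_alt
    rw [pvB_parse_eq_pvF' name.toList [] [], hF]
    show ((PySem.List.pyRange 0 (((([] ++ ps ++ [run] : List (List Char))).length : Int) - 1) 1).foldl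
        (fun cs _ => pvADA.flatMap (fun ch => cs.map (fun combo => combo ++ [ch]))) [[]]).map
      (fun combo => String.ofList ((combo.zip ([] ++ ps ++ [run] : List (List Char)).tail).foldl
        (fun out sp => out ++ sp.1 ++ sp.2) (([] ++ ps ++ [run] : List (List Char)).headD []))) = _
    simp only [List.nil_append]
    have hlen2 : ((((ps ++ [run]).length : Nat) : Int) - 1) = (ps.length : Int) := by
      push_cast [List.length_append]
      simp
    rw [hlen2, pvB_combos_eq']
    apply List.map_congr_left
    intro combo _
    rw [hq]
    show String.ofList ((combo.zip qs).foldl (fun out sp => out ++ sp.1 ++ sp.2) q) = _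
    rw [pvZipFold qs combo q]
    rfl
  rw [hA, hBv]
  by_cases hlen : (pvFlat ps ++ pvOpt run).length = 1
  · rw [if_pos hlen]
    have hcount := pvCount ps run
    have hle2 := List.countP_le_length (p := fun x : Option (List Char) => x.isNone)
      (l := pvFlat ps ++ pvOpt run)
    have hle : ps.length ≤ 1 := by omega
    cases ps with
    | nil =>
      have hr : run ≠ [] := by
        intro h
        rw [h] at hlen
        simp [pvFlat, pvOpt] at hlen
      simp [pvFlat, pvOpt, hr, pvCombos, pvJoin, pvICat]
    | cons p ps' =>
      have hps' : ps' = [] := by simp at hle; omega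
      subst hps'
      have hpr : p = [] ∧ run = [] := by
        by_cases h1 : p = [] <;> by_cases h2 : run = [] <;>
          simp [pvFlat, pvOpt, h1, h2] at hlen <;> exact ⟨h1, h2⟩
      obtain ⟨rfl, rfl⟩ := hpr
      exfalso
      rcases pvF_lone name.toList hF with h | h
      · exact hpre.1 (String.toList_inj.mp (by rw [h]; rfl))
      · exact hpre.2 (String.toList_inj.mp (by rw [h]; rfl))
  · rw [if_neg hlen, pvGen]

-- ===== VERDICT (by name: the statement is the Claim_ definition above) =====
theorem generate_alters_for_spec : Claim_equal_generate_alters_for := by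
  intro name _ hpre
  unfold Spec_generate_alters_for
  exact pvMain name hpre
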